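-- pv_equiv track=rewrite | github.com/mirenk0/Algorithmic-Problems | 3-EfficientAlgorithms/samebit.py | count_brute
-- ===== SOURCE A (Python) =====
-- def count_brute(bits):
--     n = len(bits)
--     result = 0
--     for i in range(n):
--         for j in range(i + 1, n):
--             if (bits[i] == '0' and bits[j] == '0') or (bits[i] == '1' and bits[j] == '1'):
--                 result += 1
--     return result
-- ===== SOURCE B (Python) =====
-- def count_brute(bits):
--     zeros = 0
--     ones = 0
--     for c in bits:
--         if c == '0':
--             zeros += 1
--         elif c == '1':
--             ones += 1
--     return zeros * (zeros - 1) // 2 + ones * (ones - 1) // 2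
-- ===== Notes on version B (the rewrite author's own statement) =====
-- stated objective: faster
-- what changed: Replaced the quadratic double loop over index pairs by a single pass counting '0's and '1's and the closed form C(z,2)+C(o,2).
import Mathlib
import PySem

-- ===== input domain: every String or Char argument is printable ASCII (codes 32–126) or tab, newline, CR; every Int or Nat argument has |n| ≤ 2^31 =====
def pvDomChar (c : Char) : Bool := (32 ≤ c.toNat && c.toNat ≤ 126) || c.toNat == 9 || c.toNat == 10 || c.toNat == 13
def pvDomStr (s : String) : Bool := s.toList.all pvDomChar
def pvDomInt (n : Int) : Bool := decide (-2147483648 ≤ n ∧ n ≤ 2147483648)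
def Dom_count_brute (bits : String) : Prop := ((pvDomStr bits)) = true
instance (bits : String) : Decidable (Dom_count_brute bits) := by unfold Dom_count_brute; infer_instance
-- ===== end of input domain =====

-- B replaces A's quadratic double loop by one counting pass and the closed form C(z,2)+C(o,2); proved to return the same value.

-- ===== PORT A =====
def count_brute (bits : String) : Int :=
  let n : Int := PySem.Str.len bits
  (PySem.List.pyRange 0 n 1).foldl (fun result i =>
    (PySem.List.pyRange (i + 1) n 1).foldl (fun result j =>
      if (PySem.Str.pyGet? bits i = some '0' ∧ PySem.Str.pyGet? bits j = some '0') ∨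
         (PySem.Str.pyGet? bits i = some '1' ∧ PySem.Str.pyGet? bits j = some '1')
      then result + 1 else result) result) 0

-- ===== PORT B =====
def count_brute_alt (bits : String) : Int :=
  let p : Int × Int := bits.toList.foldl
    (fun p c => if c = '0' then (p.1 + 1, p.2) else if c = '1' then (p.1, p.2 + 1) else p)
    (0, 0)
  PySem.Int.floordiv (p.1 * (p.1 - 1)) 2 + PySem.Int.floordiv (p.2 * (p.2 - 1)) 2

-- ===== PRECONDITION & SPEC =====
def Spec_count_brute (bits : String) (out : Int) : Prop := out = count_brute_alt bits
instance (bits : String) (out : Int) : Decidable (Spec_count_brute bits out) := by unfold Spec_count_brute; infer_instance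

-- ===== CLAIM (what is proved, stated in full; the proofs are below) =====
def Claim_equal_count_brute : Prop := ∀ (bits : String), Dom_count_brute bits → Spec_count_brute bits (count_brute bits)

-- ===== LEMMAS AND PROOFS =====

-- structural characterisation of A's pair count
def pvPairs : List Char → Nat
  | [] => 0
  | c :: t => (if c = '0' ∨ c = '1' then t.count c else 0) + pvPairs t

-- shift a unit-step Int range fold by one
theorem pv_shift (g : Int → Int → Int) (a b : Int) (acc : Int) :
    (PySem.List.pyRange (a + 1) (b + 1) 1).foldl g acc
      = (PySem.List.pyRange a b 1).foldl (fun r i => g r (i + 1)) acc := by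
  rw [PySem.List.pyRange_one, PySem.List.pyRange_one]
  have hb : (b + 1 - (a + 1)).toNat = (b - a).toNat := by omega
  rw [hb, List.foldl_map, List.foldl_map]
  apply PySem.List.foldl_congr_mem
  intro r k _
  have : a + 1 + (k : Int) = a + (k : Int) + 1 := by ring
  rw [this]

-- cons-shift for Python indexing with a nonnegative Int index
theorem pv_get_cons (c : Char) (t : List Char) (j : Int) (hj : 0 ≤ j) :
    PySem.List.pyGet? (c :: t) (j + 1) = PySem.List.pyGet? t j := by
  rw [PySem.List.pyGet?_of_nonneg (c :: t) (by omega : (0:Int) ≤ j + 1),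
    PySem.List.pyGet?_of_nonneg t hj,
    (by omega : (j + 1).toNat = j.toNat + 1), List.getElem?_cons_succ]

-- one row of A's inner loop, over the tail, as a countP
theorem pv_inner_row (x : Char) (t : List Char) (a : Int) (ha : 0 ≤ a) (acc : Int) :
    (PySem.List.pyRange a (t.length : Int) 1).foldl (fun r j =>
        if (some x = some '0' ∧ PySem.List.pyGet? t j = some '0') ∨
           (some x = some '1' ∧ PySem.List.pyGet? t j = some '1')
        then r + 1 else r) acc
      = acc + ((t.drop a.toNat).countP (fun y =>
          decide ((x = '0' ∧ y = '0') ∨ (x = '1' ∧ y = '1'))) : Int) := by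
  have h1 : (PySem.List.pyRange a (t.length : Int) 1).foldl (fun r j =>
        if (some x = some '0' ∧ PySem.List.pyGet? t j = some '0') ∨
           (some x = some '1' ∧ PySem.List.pyGet? t j = some '1')
        then r + 1 else r) acc
      = (PySem.List.pyRange a (t.length : Int) 1).foldl (fun r j =>
        (fun (r : Int) (y : Char) =>
          if (x = '0' ∧ y = '0') ∨ (x = '1' ∧ y = '1') then r + 1 else r)
          r (PySem.List.pyGetD t j ' ')) acc := by
    apply PySem.List.foldl_congr_mem
    intro r j hj
    have hjb := PySem.List.mem_pyRange_one.mp hj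
    rw [PySem.List.pyGet?_eq_some_getElem t (by omega : (0:Int) ≤ j) hjb.2,
      PySem.List.pyGetD_eq_getElem t ' ' (by omega : (0:Int) ≤ j) hjb.2]
    simp
  rw [h1, PySem.List.foldl_pyRange_pyGetD' t ' '
      (fun (r : Int) (y : Char) =>
        if (x = '0' ∧ y = '0') ∨ (x = '1' ∧ y = '1') then r + 1 else r) acc ha,
    PySem.List.foldl_ite_add_one]

-- the head-row count is exactly pvPairs' head summand
theorem pv_countP_head (c : Char) (t : List Char) :
    t.countP (fun y => decide ((c = '0' ∧ y = '0') ∨ (c = '1' ∧ y = '1')))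
      = (if c = '0' ∨ c = '1' then t.count c else 0) := by
  by_cases h0 : c = '0'
  · subst h0
    rw [if_pos (Or.inl rfl), List.count]
    apply List.countP_congr
    intro y _
    by_cases hy : y = '0' <;> simp [hy]
  · by_cases h1 : c = '1'
    · subst h1
      rw [if_pos (Or.inr rfl), List.count]
      apply List.countP_congr
      intro y _
      by_cases hy : y = '1' <;> simp [hy, h0]
    · rw [if_neg (by simp [h0, h1])]
      simp only [List.countP_eq_zero]
      intro y _
      simp [h0, h1]

theorem pv_A_fold (l : List Char) (acc : Int) :
    (PySem.List.pyRange 0 (l.length : Int) 1).foldl (fun result i =>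
      (PySem.List.pyRange (i + 1) (l.length : Int) 1).foldl (fun result j =>
        if (PySem.List.pyGet? l i = some '0' ∧ PySem.List.pyGet? l j = some '0') ∨
           (PySem.List.pyGet? l i = some '1' ∧ PySem.List.pyGet? l j = some '1')
        then result + 1 else result) result) acc
      = acc + (pvPairs l : Int) := by
  induction l generalizing acc with
  | nil => simp [PySem.List.pyRange_one_eq_nil, pvPairs]
  | cons c t ih =>
    have hn : ((c :: t).length : Int) = (t.length : Int) + 1 := by
      simp
    rw [hn, PySem.List.pyRange_one_cons (by positivity : (0 : Int) < (t.length : Int) + 1),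
      List.foldl_cons]
    -- shift the outer loop over indices 1..n down to 0..n-1
    have hshift := pv_shift (fun result i =>
      (PySem.List.pyRange (i + 1) ((t.length : Int) + 1) 1).foldl (fun result j =>
        if (PySem.List.pyGet? (c :: t) i = some '0' ∧ PySem.List.pyGet? (c :: t) j = some '0') ∨
           (PySem.List.pyGet? (c :: t) i = some '1' ∧ PySem.List.pyGet? (c :: t) j = some '1')
        then result + 1 else result) result) 0 (t.length : Int)
    rw [hshift]
    -- head term: the i = 0 inner loop counts matches of c in t
    have hhead : (PySem.List.pyRange (0 + 1) ((t.length : Int) + 1) 1).foldl (fun result j =>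
        if (PySem.List.pyGet? (c :: t) 0 = some '0' ∧ PySem.List.pyGet? (c :: t) j = some '0') ∨
           (PySem.List.pyGet? (c :: t) 0 = some '1' ∧ PySem.List.pyGet? (c :: t) j = some '1')
        then result + 1 else result) acc
        = acc + ((if c = '0' ∨ c = '1' then t.count c else 0 : Nat) : Int) := by
      rw [pv_shift]
      have hcongr : ∀ (r : Int), ∀ j ∈ PySem.List.pyRange 0 (t.length : Int) 1,
          (if (PySem.List.pyGet? (c :: t) 0 = some '0' ∧ PySem.List.pyGet? (c :: t) (j + 1) = some '0') ∨
              (PySem.List.pyGet? (c :: t) 0 = some '1' ∧ PySem.List.pyGet? (c :: t) (j + 1) = some '1')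
           then r + 1 else r)
          = (if (some c = some '0' ∧ PySem.List.pyGet? t j = some '0') ∨
               (some c = some '1' ∧ PySem.List.pyGet? t j = some '1')
             then r + 1 else r) := by
        intro r j hj
        have hjb := PySem.List.mem_pyRange_one.mp hj
        rw [PySem.List.pyGet?_zero_cons, pv_get_cons c t j hjb.1]
      rw [PySem.List.foldl_congr_mem _ _ _ _ hcongr, pv_inner_row c t 0 le_rfl acc]
      simp only [Int.toNat_zero, List.drop_zero, pv_countP_head]
    rw [hhead]
    -- tail: each remaining row over c :: t is the corresponding row over t
    have htail : ∀ (r : Int), ∀ i ∈ PySem.List.pyRange 0 (t.length : Int) 1,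
        (PySem.List.pyRange (i + 1 + 1) ((t.length : Int) + 1) 1).foldl (fun result j =>
          if (PySem.List.pyGet? (c :: t) (i + 1) = some '0' ∧ PySem.List.pyGet? (c :: t) j = some '0') ∨
             (PySem.List.pyGet? (c :: t) (i + 1) = some '1' ∧ PySem.List.pyGet? (c :: t) j = some '1')
          then result + 1 else result) r
        = (PySem.List.pyRange (i + 1) ((t.length : Int)) 1).foldl (fun result j =>
          if (PySem.List.pyGet? t i = some '0' ∧ PySem.List.pyGet? t j = some '0') ∨
             (PySem.List.pyGet? t i = some '1' ∧ PySem.List.pyGet? t j = some '1')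
          then result + 1 else result) r := by
      intro r i hi
      have hib := PySem.List.mem_pyRange_one.mp hi
      rw [pv_shift]
      apply PySem.List.foldl_congr_mem
      intro r' j hj
      have hjb := PySem.List.mem_pyRange_one.mp hj
      rw [pv_get_cons c t i hib.1, pv_get_cons c t j (by omega)]
    rw [PySem.List.foldl_congr_mem _ _ _ _ htail, ih]
    simp only [pvPairs]
    push_cast
    ring

theorem pv_gauss (m : Nat) : (m + 1) * m / 2 = m * (m - 1) / 2 + m := by
  cases m with
  | zero => rfl
  | succ k =>
    have h : (k + 1 + 1) * (k + 1) = (k + 1) * ((k + 1) - 1) + (k + 1) * 2 := by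
      simp; ring
    rw [h, Nat.add_mul_div_right _ _ (by norm_num : 0 < 2)]

theorem pv_pairs_nat (l : List Char) :
    pvPairs l = l.count '0' * (l.count '0' - 1) / 2 + l.count '1' * (l.count '1' - 1) / 2 := by
  induction l with
  | nil => rfl
  | cons c t ih =>
    by_cases h0 : c = '0'
    · subst h0
      simp only [pvPairs, List.count_cons, ih]
      norm_num [(show ¬('0' : Char) = '1' by decide)]
      rw [pv_gauss (List.count '0' t)]
      set A := List.count '0' t * (List.count '0' t - 1) / 2 with hA
      set B := List.count '1' t * (List.count '1' t - 1) / 2 with hB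
      omega
    · by_cases h1 : c = '1'
      · subst h1
        simp only [pvPairs, List.count_cons, ih]
        norm_num [(show ¬('1' : Char) = '0' by decide)]
        rw [pv_gauss (List.count '1' t)]
        set A := List.count '0' t * (List.count '0' t - 1) / 2 with hA
        set B := List.count '1' t * (List.count '1' t - 1) / 2 with hB
        omega
      · simp [pvPairs, ih, h0, h1]

theorem pv_cast_mul_pred (z : Nat) : ((z : Int)) * ((z : Int) - 1) = ((z * (z - 1) : Nat) : Int) := by
  cases z with
  | zero => simp
  | succ k => push_cast; ring

theorem pv_pairs_closed (l : List Char) :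
    (pvPairs l : Int)
      = PySem.Int.floordiv ((l.count '0' : Int) * ((l.count '0' : Int) - 1)) 2
        + PySem.Int.floordiv ((l.count '1' : Int) * ((l.count '1' : Int) - 1)) 2 := by
  rw [pv_cast_mul_pred, pv_cast_mul_pred,
    (by exact_mod_cast PySem.Int.floordiv_natCast (l.count '0' * (l.count '0' - 1)) 2 :
      PySem.Int.floordiv ((l.count '0' * (l.count '0' - 1) : Nat) : Int) 2
        = ((l.count '0' * (l.count '0' - 1) / 2 : Nat) : Int)),
    (by exact_mod_cast PySem.Int.floordiv_natCast (l.count '1' * (l.count '1' - 1)) 2 :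
      PySem.Int.floordiv ((l.count '1' * (l.count '1' - 1) : Nat) : Int) 2
        = ((l.count '1' * (l.count '1' - 1) / 2 : Nat) : Int)),
    pv_pairs_nat]
  push_cast
  ring

theorem pv_count_pair_aux (l : List Char) (a b : Int) :
    l.foldl (fun (p : Int × Int) c =>
        if c = '0' then (p.1 + 1, p.2) else if c = '1' then (p.1, p.2 + 1) else p) (a, b)
      = (a + (l.count '0' : Int), b + (l.count '1' : Int)) := by
  induction l generalizing a b with
  | nil => simp
  | cons c t ih =>
    by_cases h0 : c = '0'
    · subst h0; simp [ih]; ring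
    · by_cases h1 : c = '1'
      · subst h1; simp [ih, h0]; ring
      · simp [ih, h0, h1]

theorem pv_count_pair (l : List Char) :
    l.foldl (fun (p : Int × Int) c =>
        if c = '0' then (p.1 + 1, p.2) else if c = '1' then (p.1, p.2 + 1) else p) (0, 0)
      = ((l.count '0' : Int), (l.count '1' : Int)) := by
  simp [pv_count_pair_aux]

theorem pv_main (l : List Char) :
    (PySem.List.pyRange 0 (l.length : Int) 1).foldl (fun result i =>
      (PySem.List.pyRange (i + 1) (l.length : Int) 1).foldl (fun result j =>
        if (PySem.List.pyGet? l i = some '0' ∧ PySem.List.pyGet? l j = some '0') ∨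
           (PySem.List.pyGet? l i = some '1' ∧ PySem.List.pyGet? l j = some '1')
        then result + 1 else result) result) 0
      = PySem.Int.floordiv ((l.count '0' : Int) * ((l.count '0' : Int) - 1)) 2
        + PySem.Int.floordiv ((l.count '1' : Int) * ((l.count '1' : Int) - 1)) 2 := by
  rw [pv_A_fold, ← pv_pairs_closed]
  ring

-- ===== VERDICT (by name: the statement is the Claim_ definition above) =====
theorem count_brute_spec : Claim_equal_count_brute := by
  intro bits _
  unfold Spec_count_brute count_brute count_brute_alt
  simp only [PySem.Str.len_eq, PySem.Str.pyGet?_eq, pv_count_pair]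
  exact pv_main bits.toList
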